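-- pv_equiv track=rewrite | github.com/rachittshah/harness-rlm | tau2_integration/rlm_agent.py | _transcript_to_anthropic_messages
-- ===== SOURCE A (Python) =====
-- def _transcript_to_anthropic_messages(transcript: list[dict]) -> list[dict]:
--     """Collapse transcript into alternating user/assistant turns.
--
--     Anthropic rejects consecutive same-role messages, and also rejects the
--     Claude-Code-only role "tool" that appears in our internal transcript.
--     We therefore fold any tool lines *into* the preceding user turn (if
--     they came from a tool result) as a readable ``[tool_result]`` block.
--     """
--     anthropic_msgs: list[dict] = []
--     for entry in transcript:
--         role = entry.get("role", "user")
--         content = entry.get("content", "")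
--         if role == "tool":
--             if anthropic_msgs and anthropic_msgs[-1]["role"] == "user":
--                 anthropic_msgs[-1]["content"] += f"\n{content}"
--             else:
--                 anthropic_msgs.append({"role": "user", "content": content})
--             continue
--         if role not in {"user", "assistant"}:
--             role = "user"
--         if anthropic_msgs and anthropic_msgs[-1]["role"] == role:
--             anthropic_msgs[-1]["content"] += f"\n{content}"
--         else:
--             anthropic_msgs.append({"role": role, "content": content})
--     return anthropic_msgs
-- ===== SOURCE B (Python) =====
-- def _transcript_to_anthropic_messages(transcript: list[dict]) -> list[dict]:
--     """Normalize every entry's role first, then emit one message per run of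
--     consecutive equal roles, joining the run's contents with newlines."""
--     pairs = [
--         ("assistant" if e.get("role", "user") == "assistant" else "user",
--          e.get("content", ""))
--         for e in transcript
--     ]
--     out = []
--     while pairs:
--         role = pairs[0][0]
--         run = [pairs[0][1]]
--         pairs = pairs[1:]
--         while pairs and pairs[0][0] == role:
--             run.append(pairs[0][1])
--             pairs = pairs[1:]
--         out.append({"role": role, "content": "\n".join(run)})
--     return out
-- ===== Notes on version B (the rewrite author's own statement) =====
-- stated objective: simpler
-- what changed: Replaces A's single fold that mutates the last emitted message (with a special tool branch) by a two-stage decomposition: first normalize every entry to a (role, content) pair (tool and unknown roles become user), then scan for runs of consecutive equal roles and emit one message per run with its contents newline-joined.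
import Mathlib
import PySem

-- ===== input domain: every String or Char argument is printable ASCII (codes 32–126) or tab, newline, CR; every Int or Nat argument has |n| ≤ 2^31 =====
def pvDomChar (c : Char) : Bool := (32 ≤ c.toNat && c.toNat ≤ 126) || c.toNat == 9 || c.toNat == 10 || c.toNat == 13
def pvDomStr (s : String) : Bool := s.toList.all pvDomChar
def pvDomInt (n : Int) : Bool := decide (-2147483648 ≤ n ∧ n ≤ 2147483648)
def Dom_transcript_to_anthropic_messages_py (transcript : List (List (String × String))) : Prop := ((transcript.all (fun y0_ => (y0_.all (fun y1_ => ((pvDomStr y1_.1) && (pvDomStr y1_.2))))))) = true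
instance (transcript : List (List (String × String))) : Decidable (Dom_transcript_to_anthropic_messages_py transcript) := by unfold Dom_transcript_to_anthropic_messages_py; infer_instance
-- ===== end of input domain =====

-- B replaces A's single mutating fold by a two-stage decomposition (normalize roles, then group runs); objective: simpler.


-- ===== PORT A =====
-- entry.get(k, dflt) on an association-list dict: first match
def pvGetD (d : List (String × String)) (k dflt : String) : String :=
  match d with
  | [] => dflt
  | (k', v) :: rest => if k' == k then v else pvGetD rest k dflt

-- anthropic_msgs[-1]["content"] += s  (in-place overwrite of the "content" value)
def pvSetContent (m : List (String × String)) (f : String → String) : List (String × String) :=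
  m.map (fun p => if p.1 == "content" then (p.1, f p.2) else p)

-- the body of A's for-loop
def pvStepA (msgs : List (List (String × String))) (entry : List (String × String)) : List (List (String × String)) :=
  let role := pvGetD entry "role" "user"
  let content := pvGetD entry "content" ""
  if role == "tool" then
    match msgs.getLast? with
    | some last =>
        if pvGetD last "role" "" == "user" then
          msgs.dropLast ++ [pvSetContent last (fun c => c ++ "\n" ++ content)]
        else msgs ++ [[("role", "user"), ("content", content)]]
    | none => msgs ++ [[("role", "user"), ("content", content)]]
  else
    let role := if role == "user" || role == "assistant" then role else "user"
    match msgs.getLast? with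
    | some last =>
        if pvGetD last "role" "" == role then
          msgs.dropLast ++ [pvSetContent last (fun c => c ++ "\n" ++ content)]
        else msgs ++ [[("role", role), ("content", content)]]
    | none => msgs ++ [[("role", role), ("content", content)]]

def transcript_to_anthropic_messages_py (transcript : List (List (String × String))) : List (List (String × String)) :=
  transcript.foldl pvStepA []

-- ===== PORT B =====
-- stage 1: ("assistant" if e.get("role","user") == "assistant" else "user", e.get("content",""))
def pvNormalize (entry : List (String × String)) : String × String :=
  (if pvGetD entry "role" "user" == "assistant" then "assistant" else "user",
   pvGetD entry "content" "")

-- "\n".join(run)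
def pvJoinNL : List String → String
  | [] => ""
  | [c] => c
  | c :: rest => c ++ "\n" ++ pvJoinNL rest

-- the inner while loop: collect the contents of the leading run of role r, return (run contents, rest)
def pvSpan (r : String) : List (String × String) → List String × List (String × String)
  | [] => ([], [])
  | (q, c) :: rest =>
      if q == r then
        let p := pvSpan r rest
        (c :: p.1, p.2)
      else ([], (q, c) :: rest)

theorem pvSpan_snd_length_le (r : String) (l : List (String × String)) :
    (pvSpan r l).2.length ≤ l.length := by
  induction l with
  | nil => simp [pvSpan]
  | cons h t ih =>
      obtain ⟨q, c⟩ := h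
      simp only [pvSpan]
      split
      · simpa using Nat.le_succ_of_le ih
      · simp

-- the outer while loop: one message per run
def pvGroup : List (String × String) → List (List (String × String))
  | [] => []
  | (r, c) :: rest =>
      let p := pvSpan r rest
      [("role", r), ("content", pvJoinNL (c :: p.1))] :: pvGroup p.2
  termination_by l => l.length
  decreasing_by
    simpa using Nat.lt_succ_of_le (pvSpan_snd_length_le r rest)

def transcript_to_anthropic_messages_py_alt (transcript : List (List (String × String))) : List (List (String × String)) :=
  pvGroup (transcript.map pvNormalize)

-- ===== PRECONDITION & SPEC =====
def Spec_transcript_to_anthropic_messages_py (transcript : List (List (String × String))) (out : List (List (String × String))) : Prop := out = transcript_to_anthropic_messages_py_alt transcript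
instance (transcript : List (List (String × String))) (out : List (List (String × String))) : Decidable (Spec_transcript_to_anthropic_messages_py transcript out) := by unfold Spec_transcript_to_anthropic_messages_py; infer_instance

-- ===== CLAIM (what is proved, stated in full; the proofs are below) =====
def Claim_equal_transcript_to_anthropic_messages_py : Prop := ∀ (transcript : List (List (String × String))), Dom_transcript_to_anthropic_messages_py transcript → Spec_transcript_to_anthropic_messages_py transcript (transcript_to_anthropic_messages_py transcript)

-- ===== LEMMAS AND PROOFS =====

def pvMk (r c : String) : List (String × String) := [("role", r), ("content", c)]

theorem pvStepA_nil (e : List (String × String)) :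
    pvStepA [] e = [pvMk (pvNormalize e).1 (pvNormalize e).2] := by
  unfold pvStepA pvNormalize pvMk
  by_cases h1 : pvGetD e "role" "user" = "tool"
  · simp [h1]
  · by_cases h2 : pvGetD e "role" "user" = "assistant"
    · simp [h1, h2]
    · by_cases h3 : pvGetD e "role" "user" = "user" <;> simp [h1, h2, h3]

theorem pvStepA_concat (pre : List (List (String × String))) (r c : String)
    (e : List (String × String)) :
    pvStepA (pre ++ [pvMk r c]) e =
      if (pvNormalize e).1 = r then
        pre ++ [pvMk r (c ++ "\n" ++ (pvNormalize e).2)]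
      else
        pre ++ [pvMk r c, pvMk (pvNormalize e).1 (pvNormalize e).2] := by
  unfold pvStepA pvNormalize pvMk
  simp only [List.getLast?_concat, List.dropLast_concat]
  by_cases h1 : pvGetD e "role" "user" = "tool"
  · by_cases hr : r = "user"
    · simp [h1, hr, pvGetD, pvSetContent, List.append_assoc]
    · have hr' : ¬ ("user" = r) := fun hh => hr hh.symm
      simp [h1, hr, hr', pvGetD, pvSetContent, List.append_assoc]
  · by_cases h2 : pvGetD e "role" "user" = "assistant"
    · by_cases hr : r = "assistant"
      · simp [h1, h2, hr, pvGetD, pvSetContent, List.append_assoc]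
      · have hr' : ¬ ("assistant" = r) := fun hh => hr hh.symm
        simp [h1, h2, hr, hr', pvGetD, pvSetContent, List.append_assoc]
    · by_cases h3 : pvGetD e "role" "user" = "user" <;>
      · by_cases hr : r = "user"
        · simp [h1, h2, h3, hr, pvGetD, pvSetContent, List.append_assoc]
        · have hr' : ¬ ("user" = r) := fun hh => hr hh.symm
          simp [h1, h2, h3, hr, hr', pvGetD, pvSetContent, List.append_assoc]

theorem pvFold_prefix (ents : List (List (String × String)))
    (pre : List (List (String × String))) (r c : String) :
    ents.foldl pvStepA (pre ++ [pvMk r c]) = pre ++ ents.foldl pvStepA [pvMk r c] := by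
  induction ents generalizing pre r c with
  | nil => simp
  | cons e ts ih =>
      simp only [List.foldl_cons]
      rw [pvStepA_concat]
      rw [show ([pvMk r c] : List (List (String × String))) = [] ++ [pvMk r c] by simp,
        pvStepA_concat]
      simp only [List.nil_append]
      by_cases h : (pvNormalize e).1 = r
      · rw [if_pos h, if_pos h]
        exact ih pre r _
      · rw [if_neg h, if_neg h,
          show ([pvMk r c, pvMk (pvNormalize e).1 (pvNormalize e).2] : List (List (String × String)))
            = [pvMk r c] ++ [pvMk (pvNormalize e).1 (pvNormalize e).2] from rfl,
          ← List.append_assoc, ih (pre ++ [pvMk r c]) _ _, ih [pvMk r c] _ _]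
        simp

theorem pvJoinNL_merge (c c' : String) (cs : List String) :
    pvJoinNL (c :: c' :: cs) = pvJoinNL ((c ++ "\n" ++ c') :: cs) := by
  cases cs with
  | nil => simp [pvJoinNL]
  | cons x xs => simp [pvJoinNL, String.append_assoc]

theorem pvGroup_merge (r c c' : String) (ms : List (String × String)) :
    pvGroup ((r, c) :: (r, c') :: ms) = pvGroup ((r, c ++ "\n" ++ c') :: ms) := by
  rw [pvGroup, pvGroup]
  simp only [pvSpan, BEq.rfl, if_pos]
  rw [pvJoinNL_merge]

theorem pvGroup_split (r c r' c' : String) (ms : List (String × String)) (h : r' ≠ r) :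
    pvGroup ((r, c) :: (r', c') :: ms) = pvMk r c :: pvGroup ((r', c') :: ms) := by
  rw [pvGroup]
  simp [pvSpan, h, pvJoinNL, pvMk]

theorem pvFold_single (ents : List (List (String × String))) (r c : String) :
    ents.foldl pvStepA [pvMk r c] = pvGroup ((r, c) :: ents.map pvNormalize) := by
  induction ents generalizing r c with
  | nil => simp [pvGroup, pvSpan, pvJoinNL, pvMk]
  | cons e ts ih =>
      simp only [List.foldl_cons, List.map_cons]
      rw [show ([pvMk r c] : List (List (String × String))) = [] ++ [pvMk r c] by simp,
        pvStepA_concat]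
      simp only [List.nil_append]
      by_cases h : (pvNormalize e).1 = r
      · rw [if_pos h, ih,
          show (pvNormalize e : String × String) = ((pvNormalize e).1, (pvNormalize e).2) from rfl,
          h, pvGroup_merge]
      · rw [if_neg h,
          show ([pvMk r c, pvMk (pvNormalize e).1 (pvNormalize e).2] : List (List (String × String)))
            = [pvMk r c] ++ [pvMk (pvNormalize e).1 (pvNormalize e).2] from rfl,
          pvFold_prefix, ih,
          show (pvNormalize e : String × String) = ((pvNormalize e).1, (pvNormalize e).2) from rfl,
          pvGroup_split _ _ _ _ _ h]
        rfl

-- ===== VERDICT (by name: the statement is the Claim_ definition above) =====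
theorem transcript_to_anthropic_messages_py_spec : Claim_equal_transcript_to_anthropic_messages_py := by
  intro transcript _
  unfold Spec_transcript_to_anthropic_messages_py transcript_to_anthropic_messages_py
    transcript_to_anthropic_messages_py_alt
  cases transcript with
  | nil => simp [pvGroup]
  | cons e ts =>
      simp only [List.foldl_cons, List.map_cons]
      rw [pvStepA_nil, pvFold_single]
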